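-- pv_equiv track=rewrite | github.com/Deven-Biehler/Hypergraph-Anomaly-Detection | S-FFSD/create_dataset.py | get_test_mask
-- ===== SOURCE A (Python) =====
-- def get_test_mask(data):
--     test_mask = []
--     for i in range(len(data)):
--         if i % 6 == 5:
--             test_mask.append(1)
--         else:
--             test_mask.append(0)
--     return test_mask
-- ===== SOURCE B (Python) =====
-- def get_test_mask(data):
--     test_mask = [0] * len(data)
--     for i in range(5, len(data), 6):
--         test_mask[i] = 1
--     return test_mask
-- ===== Notes on version B (the rewrite author's own statement) =====
-- stated objective: alternative
-- what changed: B pre-fills a zero mask of the full length and then sets only every 6th position with a strided range(5, n, 6) assignment loop, instead of A's dense per-index pass with an if/else append.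
import Mathlib
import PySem

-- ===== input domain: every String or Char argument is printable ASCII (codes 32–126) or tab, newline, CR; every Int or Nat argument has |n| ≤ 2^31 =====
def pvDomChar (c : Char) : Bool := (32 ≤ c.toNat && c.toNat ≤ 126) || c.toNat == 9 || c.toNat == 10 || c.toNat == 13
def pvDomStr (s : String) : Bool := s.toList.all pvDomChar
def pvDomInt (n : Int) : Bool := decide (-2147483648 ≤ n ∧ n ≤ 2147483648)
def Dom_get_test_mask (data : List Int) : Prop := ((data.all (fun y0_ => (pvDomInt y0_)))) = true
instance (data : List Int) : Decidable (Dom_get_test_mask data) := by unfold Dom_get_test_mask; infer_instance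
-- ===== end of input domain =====

-- B pre-fills a zero mask and sets only every 6th index via a strided range(5, n, 6) loop; alternative decomposition, same O(n) cost.


-- ===== PORT A =====
def get_test_mask (data : List Int) : List Int :=
  (PySem.List.pyRange 0 data.length 1).foldl
    (fun acc i => if PySem.Int.mod i 6 == 5 then acc ++ [1] else acc ++ [0]) []

-- ===== PORT B =====
-- test_mask[i] = 1: every i from range(5, len(data), 6) is a valid non-negative index, so plain List.set is exact here
def get_test_mask_alt (data : List Int) : List Int :=
  (PySem.List.pyRange 5 data.length 6).foldl
    (fun acc i => acc.set i.toNat 1)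
    (List.replicate data.length 0)

-- ===== PRECONDITION & SPEC =====
def Spec_get_test_mask (data : List Int) (out : List Int) : Prop := out = get_test_mask_alt data
instance (data : List Int) (out : List Int) : Decidable (Spec_get_test_mask data out) := by unfold Spec_get_test_mask; infer_instance

-- ===== CLAIM (what is proved, stated in full; the proofs are below) =====
def Claim_equal_get_test_mask : Prop := ∀ (data : List Int), Dom_get_test_mask data → Spec_get_test_mask data (get_test_mask data)

-- ===== LEMMAS AND PROOFS =====

-- length of the set-fold is the length of its initial accumulator
theorem setfold_length (L : List Int) (init : List Int) :
    (L.foldl (fun acc i => acc.set i.toNat 1) init).length = init.length := by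
  induction L generalizing init with
  | nil => rfl
  | cons i L ih => simpa using ih (init.set i.toNat 1)

-- element j of the set-fold: 1 if j occurs among the (non-negative) indices, else the initial value
theorem setfold_getElem (L : List Int) (hL : ∀ i ∈ L, 0 ≤ i) (init : List Int) (j : Nat)
    (hj : j < (L.foldl (fun acc i => acc.set i.toNat 1) init).length) :
    (L.foldl (fun acc i => acc.set i.toNat 1) init)[j] =
      if (j : Int) ∈ L then 1 else init[j]'(by rwa [setfold_length] at hj) := by
  induction L generalizing init with
  | nil => simp
  | cons i L ih =>
    have hi : 0 ≤ i := hL i (by simp)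
    have hrec := ih (fun x hx => hL x (by simp [hx])) (init.set i.toNat 1)
      (by simpa [setfold_length] using (by rwa [setfold_length] at hj : j < init.length))
    simp only [List.foldl_cons] at *
    rw [hrec]
    by_cases hmem : (j : Int) ∈ L
    · simp [hmem]
    · have hset : (init.set i.toNat 1)[j]'(by simpa using (by rwa [setfold_length] at hj : j < init.length)) =
          if i.toNat = j then 1 else init[j]'(by rwa [setfold_length] at hj) :=
        List.getElem_set _
      rw [if_neg hmem, hset]
      by_cases hij : (j : Int) = i
      · have : i.toNat = j := by omega
        simp [this, hij]
      · have : i.toNat ≠ j := by omega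
        simp [this, hmem, hij]

-- ===== VERDICT (by name: the statement is the Claim_ definition above) =====
theorem get_test_mask_spec : Claim_equal_get_test_mask := by
  intro data _
  show get_test_mask data = get_test_mask_alt data
  unfold get_test_mask get_test_mask_alt
  have hA : (PySem.List.pyRange 0 data.length 1).foldl
      (fun acc i => if PySem.Int.mod i 6 == 5 then acc ++ [(1:Int)] else acc ++ [0]) [] =
      (PySem.List.pyRange 0 data.length 1).map
        (fun i => if PySem.Int.mod i 6 == 5 then (1:Int) else 0) := by
    have := PySem.List.foldl_append_singleton_eq_map
      (fun i => if PySem.Int.mod i 6 == 5 then (1:Int) else 0)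
      (PySem.List.pyRange 0 data.length 1) []
    simp only [List.nil_append] at this
    rw [← this]
    exact PySem.List.foldl_congr_mem _ _ _ _ (by intro acc x hx; split <;> simp_all)
  rw [hA]
  have hpos : ∀ i ∈ PySem.List.pyRange 5 (data.length : Int) 6, (0:Int) ≤ i := by
    intro i hi
    have := (PySem.List.mem_pyRange_iff_of_pos (by norm_num : (0:Int) < 6) i).mp hi
    omega
  apply List.ext_getElem
  · rw [setfold_length]
    simp [PySem.List.length_pyRange_one]
  · intro j h1 h2
    rw [setfold_getElem _ hpos _ j h2]
    have hjn : j < data.length := by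
      simpa [PySem.List.length_pyRange_one] using h1
    rw [List.getElem_map, PySem.List.getElem_pyRange_one]
    have hmem : ((j : Int) ∈ PySem.List.pyRange 5 (data.length : Int) 6) ↔
        (5 ≤ (j:Int) ∧ (j:Int) < data.length ∧ (6:Int) ∣ (j:Int) - 5) :=
      PySem.List.mem_pyRange_iff_of_pos (by norm_num) _
    have hmod : PySem.Int.mod (0 + (j:Int)) 6 = (j:Int) % 6 := by
      simp only [PySem.Int.mod, zero_add]
      rw [Int.fmod_eq_emod]
      simp
    by_cases hc : (j : Int) ∈ PySem.List.pyRange 5 (data.length : Int) 6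
    · have h5 := hmem.mp hc
      have : (0 + (j:Int)) % 6 = 5 := by omega
      rw [if_pos hc]
      have hj6 : ((j:Int)) % 6 = 5 := by omega
      simp [hj6]
    · have h5 := hmem.not.mp hc
      have hne : ¬ ((0 + (j:Int)) % 6 = 5) := by
        intro h
        exact h5 ⟨by omega, by omega, by omega⟩
      simp only [hc, if_false]
      rw [hmod]
      simp only [zero_add] at hne ⊢
      simp [hne]
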